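-- pv_equiv track=rewrite | github.com/Vaarun-Kamath/HashCode-Cisco-Inventory-Management-and-Demand-Prediction | GUI.py | get_next_hint
-- ===== SOURCE A (Python) =====
-- def get_next_hint(curr_hint, pref, data):
-- 	ready = not curr_hint
-- 	for plid in data:
-- 		if plid.startswith(pref):
-- 			if ready: break
-- 			if plid == curr_hint: ready = True
-- 	else:
-- 		if curr_hint: return get_next_hint('', pref, data)
-- 		return ''
--
-- 	if plid == curr_hint: return ''
-- 	return plid
-- ===== SOURCE B (Python) =====
-- def get_next_hint(curr_hint, pref, data):
--     matches = [p for p in data if p.startswith(pref)]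
--     if not matches:
--         return ''
--     if curr_hint and curr_hint in matches:
--         i = matches.index(curr_hint)
--         if i + 1 < len(matches):
--             return matches[i + 1]
--     return matches[0]
-- ===== Notes on version B (the rewrite author's own statement) =====
-- stated objective: simpler
-- what changed: Replaced the interleaved ready-flag scan plus depth-one self-recursion by a two-phase decomposition (filter the prefix matches once, then return the element after curr_hint's first occurrence, wrapping to the first match); Pre_ requires distinct keys, since data is a Python dict and an association list with duplicate keys represents no actual input.
import Mathlib
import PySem

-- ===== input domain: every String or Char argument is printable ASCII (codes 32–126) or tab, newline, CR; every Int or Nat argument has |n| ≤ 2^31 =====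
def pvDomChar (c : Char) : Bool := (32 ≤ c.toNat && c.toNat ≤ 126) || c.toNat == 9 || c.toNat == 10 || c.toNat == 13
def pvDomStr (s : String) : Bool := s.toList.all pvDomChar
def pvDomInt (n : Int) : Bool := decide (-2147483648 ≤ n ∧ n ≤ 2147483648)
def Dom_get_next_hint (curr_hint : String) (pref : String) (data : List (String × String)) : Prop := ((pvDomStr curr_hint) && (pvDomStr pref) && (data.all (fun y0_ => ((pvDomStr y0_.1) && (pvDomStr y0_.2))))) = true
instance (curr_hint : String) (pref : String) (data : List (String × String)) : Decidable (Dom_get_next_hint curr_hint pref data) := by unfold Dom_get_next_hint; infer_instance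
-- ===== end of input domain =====

-- B replaces A's ready-flag scan plus self-recursion by filter-then-successor lookup (objective: simpler); equal to A on every dict input (distinct keys).
-- ===== PORT A =====
-- the for/else loop over the dict's keys: returns the plid broken on, or none if the loop exhausts
def pvLoopA (ready : Bool) (curr_hint : String) (pref : String) : List String → Option String
  | [] => none
  | plid :: rest =>
    if PySem.Str.startswith plid pref then
      if ready then some plid
      else pvLoopA (plid == curr_hint) curr_hint pref rest
    else pvLoopA ready curr_hint pref rest

def get_next_hint (curr_hint : String) (pref : String) (data : List (String × String)) : String :=
  match pvLoopA (curr_hint == "") curr_hint pref (data.map Prod.fst) with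
  | some plid => if plid == curr_hint then "" else plid
  | none => if curr_hint == "" then "" else get_next_hint "" pref data
termination_by (if curr_hint = "" then 0 else 1)
decreasing_by
  rename_i h
  simp_all

-- ===== PORT B =====
-- 'if not matches … if curr_hint and curr_hint in matches: i = matches.index(…); if i+1 < len: return matches[i+1] … return matches[0]'
def pvLookupB (curr : String) : List String → String
  | [] => ""
  | m0 :: t =>
    if curr ≠ "" ∧ curr ∈ m0 :: t then
      match PySem.List.index? (m0 :: t) curr with
      | some i => if _h : i + 1 < (m0 :: t).length then (m0 :: t)[i+1] else m0
      | none => m0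
    else m0

def get_next_hint_alt (curr_hint : String) (pref : String) (data : List (String × String)) : String :=
  pvLookupB curr_hint ((data.map Prod.fst).filter (fun p => PySem.Str.startswith p pref))

-- ===== PRECONDITION & SPEC =====
-- Pre_ requires the keys of data to be pairwise distinct: data is a Python dict, so an
-- association list with duplicate keys represents no actual input of A.
def Pre_get_next_hint (curr_hint : String) (pref : String) (data : List (String × String)) : Prop :=
  (data.map Prod.fst).Nodup
instance (curr_hint : String) (pref : String) (data : List (String × String)) : Decidable (Pre_get_next_hint curr_hint pref data) := by unfold Pre_get_next_hint; infer_instance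

def pvWitness_get_next_hint : String × String × (List (String × String)) := ("a", "", [("a", "x"), ("ab", "y")])

def Spec_get_next_hint (curr_hint : String) (pref : String) (data : List (String × String)) (out : String) : Prop := out = get_next_hint_alt curr_hint pref data
instance (curr_hint : String) (pref : String) (data : List (String × String)) (out : String) : Decidable (Spec_get_next_hint curr_hint pref data out) := by unfold Spec_get_next_hint; infer_instance

-- ===== CLAIM (what is proved, stated in full; the proofs are below) =====
def Claim_equal_get_next_hint : Prop := ∀ (curr_hint : String) (pref : String) (data : List (String × String)), Dom_get_next_hint curr_hint pref data → Pre_get_next_hint curr_hint pref data → Spec_get_next_hint curr_hint pref data (get_next_hint curr_hint pref data)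

-- ===== LEMMAS AND PROOFS =====
-- the successor of the first occurrence, as a single scan (proof-only helper)
def pvFindNext (c : String) : List String → Option String
  | [] => none
  | m :: rest => if m == c then rest.head? else pvFindNext c rest

-- under distinct keys, the first occurrence of c is never followed by c again
theorem pvFindNext_ne_self (c : String) (ms : List String) (h : ms.Nodup) :
    pvFindNext c ms ≠ some c := by
  induction ms with
  | nil => simp [pvFindNext]
  | cons m rest ih =>
    by_cases hm : m = c
    · subst hm
      simp only [pvFindNext, beq_self_eq_true, if_true]
      intro hc
      exact (List.nodup_cons.mp h).1 (List.mem_of_mem_head? hc)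
    · have hmc : (m == c) = false := beq_eq_false_iff_ne.mpr hm
      simpa [pvFindNext, hmc] using ih (List.nodup_cons.mp h).2

-- ready=true: the loop breaks on the first prefix match
theorem pvLoopA_true (c pref : String) (L : List String) :
    pvLoopA true c pref L = L.find? (fun p => PySem.Chars.startswith p.toList pref.toList) := by
  induction L with
  | nil => rfl
  | cons p rest ih =>
    cases h : PySem.Chars.startswith p.toList pref.toList <;>
      simp [pvLoopA, List.find?, h, ih]

-- ready=false: the loop computes the successor lookup in the filtered list
theorem pvLoopA_false (c pref : String) (L : List String) :
    pvLoopA false c pref L = pvFindNext c (L.filter (fun p => PySem.Chars.startswith p.toList pref.toList)) := by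
  induction L with
  | nil => rfl
  | cons p rest ih =>
    cases h : PySem.Chars.startswith p.toList pref.toList with
    | false => simp [pvLoopA, List.filter, h, ih]
    | true =>
      by_cases hc : p = c
      · subst hc
        simp [pvLoopA, List.filter, h, pvLoopA_true, pvFindNext, List.head?_filter]
      · have hpc : (p == c) = false := beq_eq_false_iff_ne.mpr hc
        simp [pvLoopA, List.filter, h, hpc, pvFindNext, ih]

theorem pvFindNext_eq_idx (c : String) (ms : List String) :
    pvFindNext c ms = (List.idxOf? c ms).bind (fun i => ms[i+1]?) := by
  induction ms with
  | nil => simp [pvFindNext]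
  | cons m rest ih =>
    by_cases hm : m = c
    · subst hm
      rw [List.idxOf?_cons]
      simp [pvFindNext, List.head?_eq_getElem?]
    · have hmc : (m == c) = false := beq_eq_false_iff_ne.mpr hm
      rw [List.idxOf?_cons]
      simp only [pvFindNext, hmc, Bool.false_eq_true, if_false, ih]
      cases h : List.idxOf? c rest <;> simp

-- B's lookup on a nonempty list, characterised by pvFindNext (for c ≠ "")
theorem pvLookupB_char (c : String) (hc : c ≠ "") (m0 : String) (t : List String) :
    pvLookupB c (m0 :: t) = (pvFindNext c (m0 :: t)).getD m0 := by
  rw [pvFindNext_eq_idx]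
  by_cases hmem : c ∈ m0 :: t
  · obtain ⟨i, hi⟩ := Option.isSome_iff_exists.mp (List.isSome_idxOf?.mpr hmem)
    simp only [pvLookupB, hc, hmem, and_true, ne_eq, not_false_eq_true, if_true,
      PySem.List.index?_eq_idxOf?, hi, Option.bind_some]
    by_cases hlt : i + 1 < (m0 :: t).length
    · rw [List.getElem?_eq_getElem hlt]
      simp [show i < t.length by simpa using hlt]
    · rw [List.getElem?_eq_none (by omega : (m0 :: t).length ≤ i + 1)]
      simp only [Option.getD_none]
      rw [dif_neg (by simp at hlt ⊢; omega)]
  · have hidx : List.idxOf? c (m0 :: t) = none := List.idxOf?_eq_none_iff.mpr hmem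
    simp [pvLookupB, hmem, hidx]

-- A, fully characterised via the filtered list (any curr_hint)
theorem get_next_hint_char (c pref : String) (data : List (String × String)) :
    get_next_hint c pref data = (match (data.map Prod.fst).filter (fun p => PySem.Chars.startswith p.toList pref.toList) with
      | [] => ""
      | m0 :: _ =>
          if c ≠ "" then
            match pvFindNext c ((data.map Prod.fst).filter (fun p => PySem.Chars.startswith p.toList pref.toList)) with
            | some nxt => if nxt == c then "" else nxt
            | none => m0
          else m0) := by
  have hfind : (data.map Prod.fst).find? (fun p => PySem.Chars.startswith p.toList pref.toList)
      = ((data.map Prod.fst).filter (fun p => PySem.Chars.startswith p.toList pref.toList)).head? :=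
    List.head?_filter.symm
  by_cases hc : c = ""
  · subst hc
    rw [get_next_hint]
    simp only [beq_self_eq_true, if_true, pvLoopA_true, hfind,
      ne_eq, not_true_eq_false, if_false]
    cases h : (data.map Prod.fst).filter (fun p => PySem.Chars.startswith p.toList pref.toList) with
    | nil => simp
    | cons m0 t =>
      simp only [List.head?]
      by_cases hm : m0 = "" <;> simp [hm]
  · have hb : (c == "") = false := beq_eq_false_iff_ne.mpr hc
    rw [get_next_hint]
    simp only [hb, Bool.false_eq_true, if_false, pvLoopA_false,
      hc, ne_eq, not_false_eq_true, if_true]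
    cases h : (data.map Prod.fst).filter (fun p => PySem.Chars.startswith p.toList pref.toList) with
    | nil =>
      simp only [pvFindNext]
      rw [get_next_hint]
      simp only [beq_self_eq_true, if_true, pvLoopA_true, hfind, h]
      rfl
    | cons m0 t =>
      cases hf : pvFindNext c (m0 :: t) with
      | some nxt => simp
      | none =>
        simp only
        rw [get_next_hint]
        simp only [beq_self_eq_true, pvLoopA_true, hfind, h,
          List.head?]
        by_cases hm : m0 = "" <;> simp [hm]

-- ===== VERDICT (by name: the statements are the Claim_ definitions above) =====
theorem get_next_hint_spec : Claim_equal_get_next_hint := by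
  intro c pref data _ hpre
  unfold Pre_get_next_hint at hpre
  unfold Spec_get_next_hint get_next_hint_alt
  simp only [PySem.Str.startswith_eq]
  rw [get_next_hint_char]
  by_cases hc : c = ""
  · subst hc
    cases h : (data.map Prod.fst).filter (fun p => PySem.Chars.startswith p.toList pref.toList) with
    | nil => simp [pvLookupB]
    | cons m0 t => simp [pvLookupB]
  · cases h : (data.map Prod.fst).filter (fun p => PySem.Chars.startswith p.toList pref.toList) with
    | nil => simp [pvLookupB]
    | cons m0 t =>
      rw [pvLookupB_char c hc]
      have hnots : pvFindNext c (m0 :: t) ≠ some c := by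
        rw [← h]
        exact pvFindNext_ne_self c _ (List.Nodup.filter _ hpre)
      cases hf : pvFindNext c (m0 :: t) with
      | none => simp [hc]
      | some nxt =>
        have hne : (nxt == c) = false := beq_eq_false_iff_ne.mpr (by rintro rfl; exact hnots hf)
        simp [hc, hne]
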